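-- pv_equiv track=rewrite | github.com/niladriranjandas/DREAMv2 | packages/xplor-nih-3.0.3/python/selectTools.py | makeAtomSelStringFromResidList
-- ===== SOURCE A (Python) =====
-- def makeAtomSelStringFromResidList(resList):
--     """
--     Make an Xplor atom selection string from a list of residue numbers.
--     """
--     resList.sort()
--
--     listLen=len(resList)
--
--     s=''
--     ret=''
--     if listLen > 0:
--      r_s=resList[0]
--      r_st=r_s
--      k=1
--      while k < listLen:
--         r_c=resList[k]
--         if r_c > r_st+1:
--            if r_s==r_st:
--               s += ' resid %i'%r_s
--            else:
--               s += ' resid %i'%r_s+':%i'%r_st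
--               pass
--            r_s=r_c
--            r_st=r_c
--         else:
--            r_st=r_c
--            pass
--         k+=1
--         pass
--
--      if r_s==r_st:
--         s += ' resid %i'%r_s
--      else:
--         s += ' resid %i'%r_s+':%i'%r_st
--         pass
--
--      ret=s[1]
--
--      count=0
--      k=2
--      pos_in=0
--      while k < len(s):
--         if s[k]=='r':
--           count+=1
--           st=ret[0:len(ret)-1]
--           ret=st+')'
--           ret += ' or ('
--           pass
--         ret += s[k]
--         k+=1
--         pass
--
--      if count > 0:
--        ret='('+ret+')'
--
--     return ret
-- ===== SOURCE B (Python) =====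
-- def makeAtomSelStringFromResidList(resList):
--     """
--     Make an Xplor atom selection string from a list of residue numbers.
--     """
--     resList.sort()
--     ranges = []
--     for r in resList:
--         if ranges and r <= ranges[-1][1] + 1:
--             ranges[-1][1] = r
--         else:
--             ranges.append([r, r])
--     parts = ['resid %i' % a if a == b else 'resid %i:%i' % (a, b)
--              for a, b in ranges]
--     if len(parts) <= 1:
--         return ''.join(parts)
--     return '(' + ') or ('.join(parts) + ')'
-- ===== Notes on version B (the rewrite author's own statement) =====
-- stated objective: faster
-- what changed: B collapses the sorted residues into (start,end) range pairs and joins the formatted pieces with ') or (' in one join, replacing A's concatenated string plus its character-by-character second pass that rebuilds the string around every 'r'.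
import Mathlib
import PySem

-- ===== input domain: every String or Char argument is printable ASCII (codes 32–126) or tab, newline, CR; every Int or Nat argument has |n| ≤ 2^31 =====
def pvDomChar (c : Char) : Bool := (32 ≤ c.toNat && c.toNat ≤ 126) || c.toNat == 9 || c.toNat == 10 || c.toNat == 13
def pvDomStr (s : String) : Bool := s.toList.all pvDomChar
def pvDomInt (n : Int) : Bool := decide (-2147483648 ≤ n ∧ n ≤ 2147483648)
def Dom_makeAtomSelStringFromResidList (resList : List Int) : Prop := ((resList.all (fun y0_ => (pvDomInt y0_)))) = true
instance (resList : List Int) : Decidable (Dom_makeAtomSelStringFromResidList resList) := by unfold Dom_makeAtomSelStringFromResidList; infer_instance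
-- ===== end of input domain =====

-- B replaces A's string concatenation + character-by-character re-editing pass by collecting
-- (start,end) range pairs and joining the formatted pieces once ("simpler").
-- Note: both A and B sort resList in place in Python; the equivalence proved here is about the return value.

-- ===== PORT A =====
-- ' resid %i' % r_s  /  ' resid %i:%i' % (r_s, r_st)
def pvSegA (rs rst : Int) : List Char :=
  if rs == rst then (" resid ").toList ++ PySem.Int.toChars rs
  else (" resid ").toList ++ PySem.Int.toChars rs ++ (":").toList ++ PySem.Int.toChars rst

-- the first while loop: collapse consecutive residues, concatenating segments onto s
def pvLoopA1 : List Int → Int → Int → List Char → List Char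
  | [], rs, rst, s => s ++ pvSegA rs rst
  | c :: ks, rs, rst, s =>
    if c > rst + 1 then pvLoopA1 ks c c (s ++ pvSegA rs rst)
    else pvLoopA1 ks rs c s

-- the second while loop: character-by-character surgery around each 'r'
def pvLoopA2 : List Char → List Char → Nat → List Char × Nat
  | [], ret, count => (ret, count)
  | c :: cs, ret, count =>
    if c == 'r' then
      pvLoopA2 cs ((ret.dropLast ++ [')']) ++ (" or (").toList ++ [c]) (count + 1)
    else pvLoopA2 cs (ret ++ [c]) count

def makeAtomSelStringFromResidList (resList : List Int) : String :=
  let srt := PySem.List.sorted resList (fun x => x) false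
  match srt with
  | [] => ""
  | r0 :: rest =>
    let s := pvLoopA1 rest r0 r0 []
    match PySem.List.pyGet? s 1 with
    | none => ""   -- unreachable: s always starts with " resid …"
    | some c0 =>
      match pvLoopA2 (s.drop 2) [c0] 0 with
      | (ret, count) => if count > 0 then String.mk (('(' :: ret) ++ [')']) else String.mk ret

-- ===== PORT B =====
-- append r to the range list: extend the last range or start a new one
def pvPushRange (acc : List (Int × Int)) (r : Int) : List (Int × Int) :=
  match acc.getLast? with
  | some (a, b) => if r ≤ b + 1 then acc.dropLast ++ [(a, r)] else acc ++ [(r, r)]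
  | none => [(r, r)]

-- 'resid %i' % a  /  'resid %i:%i' % (a, b)
def pvFmtRange (p : Int × Int) : List Char :=
  if p.1 == p.2 then ("resid ").toList ++ PySem.Int.toChars p.1
  else ("resid ").toList ++ PySem.Int.toChars p.1 ++ (":").toList ++ PySem.Int.toChars p.2

def makeAtomSelStringFromResidList_alt (resList : List Int) : String :=
  let srt := PySem.List.sorted resList (fun x => x) false
  let ranges := srt.foldl pvPushRange []
  let parts := ranges.map pvFmtRange
  if parts.length ≤ 1 then String.mk (PySem.Chars.join [] parts)
  else String.mk (('(' :: PySem.Chars.join (") or (").toList parts) ++ [')'])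

-- ===== PRECONDITION & SPEC =====
def Spec_makeAtomSelStringFromResidList (resList : List Int) (out : String) : Prop := out = makeAtomSelStringFromResidList_alt resList
instance (resList : List Int) (out : String) : Decidable (Spec_makeAtomSelStringFromResidList resList out) := by unfold Spec_makeAtomSelStringFromResidList; infer_instance

-- ===== CLAIM (what is proved, stated in full; the proofs are below) =====
def Claim_equal_makeAtomSelStringFromResidList : Prop := ∀ (resList : List Int), Dom_makeAtomSelStringFromResidList resList → Spec_makeAtomSelStringFromResidList resList (makeAtomSelStringFromResidList resList)

-- ===== LEMMAS AND PROOFS =====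

-- the list of maximal ranges extracted from the sorted residue list (proof-side characterisation)
def pvRangesFrom (a b : Int) : List Int → List (Int × Int)
  | [] => [(a, b)]
  | c :: ks => if c > b + 1 then (a, b) :: pvRangesFrom c c ks else pvRangesFrom a c ks

theorem pvRangesFrom_ne_nil (a b : Int) (ks : List Int) : pvRangesFrom a b ks ≠ [] := by
  induction ks generalizing a b with
  | nil => simp [pvRangesFrom]
  | cons c ks ih => simp only [pvRangesFrom]; split <;> simp [ih]

theorem pvSegA_eq (a b : Int) : pvSegA a b = ' ' :: pvFmtRange (a, b) := by
  unfold pvSegA pvFmtRange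
  split <;> rfl

theorem pvLoopA1_eq (ks : List Int) (a b : Int) (s : List Char) :
    pvLoopA1 ks a b s = s ++ ((pvRangesFrom a b ks).map (fun p => ' ' :: pvFmtRange p)).flatten := by
  induction ks generalizing a b s with
  | nil => simp [pvLoopA1, pvRangesFrom, pvSegA_eq]
  | cons c ks ih =>
    simp only [pvLoopA1, pvRangesFrom]
    split
    · rw [ih]; simp [pvSegA_eq]
    · rw [ih]

theorem pvFoldl_pushRange (ks : List Int) (acc : List (Int × Int)) (a b : Int) :
    List.foldl pvPushRange (acc ++ [(a, b)]) ks = acc ++ pvRangesFrom a b ks := by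
  induction ks generalizing acc a b with
  | nil => simp [pvRangesFrom]
  | cons c ks ih =>
    simp only [List.foldl_cons, pvRangesFrom]
    have hl : (acc ++ [(a, b)]).getLast? = some (a, b) := by simp
    by_cases h : c > b + 1
    · have : pvPushRange (acc ++ [(a, b)]) c = (acc ++ [(a, b)]) ++ [(c, c)] := by
        simp only [pvPushRange, hl]
        rw [if_neg (by omega)]
      rw [this, ih, if_pos h]
      simp
    · have : pvPushRange (acc ++ [(a, b)]) c = acc ++ [(a, c)] := by
        simp only [pvPushRange, hl]
        rw [if_pos (by omega)]
        simp
      rw [this, ih, if_neg h]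

theorem pvDigitChar_ne_r (m : Nat) : Nat.digitChar m ≠ 'r' := by
  rcases lt_or_ge m 16 with h | h
  · interval_cases m <;> decide
  · simp only [Nat.digitChar]
    rw [if_neg (by omega), if_neg (by omega), if_neg (by omega), if_neg (by omega),
        if_neg (by omega), if_neg (by omega), if_neg (by omega), if_neg (by omega),
        if_neg (by omega), if_neg (by omega), if_neg (by omega), if_neg (by omega),
        if_neg (by omega), if_neg (by omega), if_neg (by omega), if_neg (by omega)]
    decide

theorem pvToDigitsCore_ne_r (fuel : Nat) : ∀ (n : Nat) (acc : List Char),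
    'r' ∉ acc → 'r' ∉ Nat.toDigitsCore 10 fuel n acc := by
  induction fuel with
  | zero => intro n acc h; simpa [Nat.toDigitsCore] using h
  | succ fuel ih =>
    intro n acc h
    simp only [Nat.toDigitsCore]
    split
    · intro hmem
      rcases List.mem_cons.mp hmem with h1 | h2
      · exact pvDigitChar_ne_r _ h1.symm
      · exact h h2
    · apply ih
      intro hmem
      rcases List.mem_cons.mp hmem with h1 | h2
      · exact pvDigitChar_ne_r _ h1.symm
      · exact h h2

theorem pvToChars_ne_r (n : Int) : 'r' ∉ PySem.Int.toChars n := by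
  unfold PySem.Int.toChars
  split
  · intro hmem
    rcases List.mem_cons.mp hmem with h1 | h2
    · exact absurd h1 (by decide)
    · exact pvToDigitsCore_ne_r _ _ _ (by simp) h2
  · exact pvToDigitsCore_ne_r _ _ _ (by simp)

theorem pvFmtRange_shape (p : Int × Int) : ∃ t, pvFmtRange p = 'r' :: t ∧ 'r' ∉ t := by
  unfold pvFmtRange
  split
  · refine ⟨("esid ").toList ++ PySem.Int.toChars p.1, rfl, ?_⟩
    simp only [List.mem_append]
    rintro (h | h)
    · exact absurd h (by decide)
    · exact pvToChars_ne_r _ h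
  · refine ⟨("esid ").toList ++ PySem.Int.toChars p.1 ++ (":").toList ++ PySem.Int.toChars p.2, rfl, ?_⟩
    simp only [List.mem_append]
    rintro (((h | h) | h) | h)
    · exact absurd h (by decide)
    · exact pvToChars_ne_r _ h
    · exact absurd h (by decide)
    · exact pvToChars_ne_r _ h

theorem pvLoopA2_skip (cs : List Char) : ∀ (rest ret : List Char) (count : Nat), 'r' ∉ cs →
    pvLoopA2 (cs ++ rest) ret count = pvLoopA2 rest (ret ++ cs) count := by
  induction cs with
  | nil => intro rest ret count _; simp
  | cons c cs ih =>
    intro rest ret count h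
    have hcne : c ≠ 'r' := by rintro rfl; exact h (List.mem_cons_self)
    have hc : (c == 'r') = false := beq_eq_false_iff_ne.mpr hcne
    simp only [List.cons_append, pvLoopA2, hc, Bool.false_eq_true, if_false]
    rw [ih rest (ret ++ [c]) count (fun hm => h (List.mem_cons_of_mem _ hm))]
    simp

theorem pvLoopA2_main (ps : List (List Char)) : ∀ (ret : List Char) (count : Nat),
    (∀ p ∈ ps, ∃ t, p = 'r' :: t ∧ 'r' ∉ t) →
    pvLoopA2 ((ps.map (fun p => ' ' :: p)).flatten) ret count
      = (ret ++ (ps.map (fun p => (") or (").toList ++ p)).flatten, count + ps.length) := by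
  induction ps with
  | nil => intro ret count _; simp [pvLoopA2]
  | cons p ps ih =>
    intro ret count hs
    obtain ⟨t, hp, hnr⟩ := hs p (by simp)
    subst hp
    simp only [List.map_cons, List.flatten_cons, List.cons_append, List.append_assoc]
    show pvLoopA2 (' ' :: ('r' :: (t ++ _))) ret count = _
    rw [pvLoopA2, if_neg (by decide)]
    rw [pvLoopA2, if_pos (by decide)]
    rw [List.dropLast_concat]
    rw [pvLoopA2_skip t _ _ _ hnr]
    rw [ih _ _ (fun q hq => hs q (by simp [hq]))]
    simp only [Prod.mk.injEq]
    refine ⟨?_, by simp; omega⟩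
    have hlit : ((") or (").toList : List Char) = ')' :: (" or (").toList := rfl
    rw [hlit]
    simp

theorem pvJoin_eq (sep : List Char) (q : List Char) (qs : List (List Char)) :
    PySem.Chars.join sep (q :: qs) = q ++ (qs.map (fun p => sep ++ p)).flatten := by
  induction qs generalizing q with
  | nil => simp [PySem.Chars.join_singleton]
  | cons q1 qs ih =>
    rw [PySem.Chars.join_cons_cons, ih q1]
    simp

-- ===== VERDICT (by name: the statement is the Claim_ definition above) =====
theorem makeAtomSelStringFromResidList_spec : Claim_equal_makeAtomSelStringFromResidList := by
  intro resList _
  unfold Spec_makeAtomSelStringFromResidList makeAtomSelStringFromResidList makeAtomSelStringFromResidList_alt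
  cases hs : PySem.List.sorted resList (fun x => x) false with
  | nil => decide
  | cons r0 rest =>
    simp only []
    -- B's ranges are pvRangesFrom r0 r0 rest
    have hB : List.foldl pvPushRange [] (r0 :: rest) = pvRangesFrom r0 r0 rest := by
      have h0 : pvPushRange [] r0 = [(r0, r0)] := by simp [pvPushRange]
      simp only [List.foldl_cons, h0]
      have := pvFoldl_pushRange rest [] r0 r0
      simpa using this
    -- the parts list is nonempty
    obtain ⟨q0, qs, hparts⟩ : ∃ q0 qs, (pvRangesFrom r0 r0 rest).map pvFmtRange = q0 :: qs := by
      cases hr : pvRangesFrom r0 r0 rest with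
      | nil => exact absurd hr (pvRangesFrom_ne_nil _ _ _)
      | cons p ps => exact ⟨pvFmtRange p, ps.map pvFmtRange, by simp⟩
    have hshape : ∀ q ∈ q0 :: qs, ∃ t, q = 'r' :: t ∧ 'r' ∉ t := by
      intro q hq
      rw [← hparts] at hq
      obtain ⟨p, _, hp⟩ := List.mem_map.mp hq
      exact hp ▸ pvFmtRange_shape p
    obtain ⟨t0, hq0, hnr0⟩ := hshape q0 (by simp)
    -- A's s
    have hmapeq : (pvRangesFrom r0 r0 rest).map (fun p => ' ' :: pvFmtRange p)
        = (q0 :: qs).map (fun p => ' ' :: p) := by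
      rw [show (fun p => ' ' :: pvFmtRange p) = ((fun q => ' ' :: q) ∘ pvFmtRange) from rfl,
        ← List.map_map, hparts]
    have hsA : pvLoopA1 rest r0 r0 []
        = ' ' :: 'r' :: (t0 ++ ((qs.map (fun p => ' ' :: p)).flatten)) := by
      rw [pvLoopA1_eq, hmapeq]
      simp [hq0]
    rw [hsA]
    have hget : PySem.List.pyGet? (' ' :: 'r' :: (t0 ++ ((qs.map (fun p => ' ' :: p)).flatten))) (1 : Int)
        = some 'r' := by
      simp only [PySem.List.pyGet?, PySem.List.pyIdx?]
      simp only [List.length_cons, List.length_append, List.length_flatten]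
      split
      · split
        · rfl
        · omega
      · omega
    rw [hget]
    simp only [List.drop_succ_cons, List.drop_zero]
    rw [pvLoopA2_skip t0 _ _ _ hnr0]
    have hmain := pvLoopA2_main qs (['r'] ++ t0) 0 (fun q hq => hshape q (by simp [hq]))
    rw [hmain]
    simp only []
    rw [hB, hparts]
    cases qs with
    | nil =>
      simp [PySem.Chars.join_singleton, hq0]
    | cons q1 qs' =>
      have hlen : ¬ (q0 :: q1 :: qs').length ≤ 1 := by simp
      rw [if_neg hlen, if_pos (by simp)]
      rw [pvJoin_eq]
      simp [hq0]
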